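-- pv_equiv track=rewrite | github.com/piotrlalak/Python | BarcodeLabel.py | getFilenamePath
-- ===== SOURCE A (Python) =====
-- def getFilenamePath(filename):
--     tempDirectory = filename.split('/')
--     currentDirectory = ''
--     for a in range(0,(len(tempDirectory)-1)):
--         if tempDirectory[a] == '':
--             currentDirectory += '/'
--         else:
--             currentDirectory += tempDirectory[a] + '/'
--     return currentDirectory
-- ===== SOURCE B (Python) =====
-- def getFilenamePath(filename):
--     idx = filename.rfind('/')
--     if idx < 0:
--         return ''
--     return filename[:idx + 1]
-- ===== Notes on version B (the rewrite author's own statement) =====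
-- stated objective: simpler
-- what changed: Replaces the split-into-segments-and-reconstruct loop with a single rfind of the last separator and one slice of the original string.
import Mathlib
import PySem

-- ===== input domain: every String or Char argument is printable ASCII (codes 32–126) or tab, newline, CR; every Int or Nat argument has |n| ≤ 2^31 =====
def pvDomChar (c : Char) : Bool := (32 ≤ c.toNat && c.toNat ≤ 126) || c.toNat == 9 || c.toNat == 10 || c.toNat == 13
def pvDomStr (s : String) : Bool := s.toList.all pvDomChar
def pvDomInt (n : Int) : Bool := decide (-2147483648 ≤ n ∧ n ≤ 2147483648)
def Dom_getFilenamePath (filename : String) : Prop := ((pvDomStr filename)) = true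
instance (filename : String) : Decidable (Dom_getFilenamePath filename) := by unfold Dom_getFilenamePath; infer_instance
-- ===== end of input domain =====

-- B replaces A's split-into-segments-and-reconstruct loop by rfind of the last separator plus one slice (objective: simpler).

-- ===== PORT A =====
-- A: split on '/', then rebuild all segments but the last, appending '/' after each
-- (the empty segment contributing a bare '/'); strings are handled as List Char
-- (PySem.Chars) with String.ofList at the end, as the prelude prescribes.
def getFilenamePath (filename : String) : String :=
  let tempDirectory := PySem.Chars.splitOn filename.toList ['/']
  let currentDirectory :=
    (PySem.List.pyRange 0 ((tempDirectory.length : Int) - 1)).foldl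
      (fun cur a =>
        if PySem.List.pyGetD tempDirectory a [] = [] then cur ++ ['/']
        else cur ++ PySem.List.pyGetD tempDirectory a [] ++ ['/']) []
  String.ofList currentDirectory

-- ===== PORT B =====
-- B: idx = filename.rfind('/'); '' if idx < 0 else filename[:idx+1].
def getFilenamePath_alt (filename : String) : String :=
  let idx := PySem.Str.rfind filename "/"
  if idx < 0 then "" else PySem.Str.slice filename none (some (idx + 1))

-- ===== PRECONDITION & SPEC =====
def Spec_getFilenamePath (filename : String) (out : String) : Prop := out = getFilenamePath_alt filename
instance (filename : String) (out : String) : Decidable (Spec_getFilenamePath filename out) := by unfold Spec_getFilenamePath; infer_instance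

-- ===== CLAIM (what is proved, stated in full; the proofs are below) =====
def Claim_equal_getFilenamePath : Prop := ∀ (filename : String), Dom_getFilenamePath filename → Spec_getFilenamePath filename (getFilenamePath filename)

-- ===== LEMMAS AND PROOFS =====

-- Reference recursions used only by the proofs: pvSplit = split on '/',
-- pvRfind = index of the last '/' (-1 if none).
def pvConsHead (x : List Char) : List (List Char) → List (List Char)
  | [] => [x]
  | p :: ps => (x ++ p) :: ps

def pvSplit : List Char → List (List Char)
  | [] => [[]]
  | c :: cs => if c = '/' then [] :: pvSplit cs else pvConsHead [c] (pvSplit cs)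

def pvRfind : List Char → Int
  | [] => -1
  | c :: cs => if pvRfind cs = -1 then (if c = '/' then 0 else -1) else pvRfind cs + 1

lemma pvConsHead_ne_nil (x : List Char) (m : List (List Char)) : pvConsHead x m ≠ [] := by
  cases m <;> simp [pvConsHead]

lemma pvSplit_ne_nil (cs : List Char) : pvSplit cs ≠ [] := by
  cases cs with
  | nil => simp [pvSplit]
  | cons c cs =>
    simp only [pvSplit]
    split_ifs
    · simp
    · exact pvConsHead_ne_nil _ _

lemma pvConsHead_nil_of_ne_nil {m : List (List Char)} (h : m ≠ []) : pvConsHead [] m = m := by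
  cases m with
  | nil => exact absurd rfl h
  | cons p ps => simp [pvConsHead]

lemma pvConsHead_pvConsHead (x y : List Char) (m : List (List Char)) :
    pvConsHead x (pvConsHead y m) = pvConsHead (x ++ y) m := by
  cases m <;> simp [pvConsHead]

lemma pvSplit_cons_slash (cs : List Char) : pvSplit ('/' :: cs) = [] :: pvSplit cs := by
  simp [pvSplit]

lemma pvSplit_cons_ne {c : Char} (cs : List Char) (hc : c ≠ '/') :
    pvSplit (c :: cs) = pvConsHead [c] (pvSplit cs) := by
  simp [pvSplit, hc]

lemma length_pvConsHead {m : List (List Char)} (x : List Char) (h : m ≠ []) :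
    (pvConsHead x m).length = m.length := by
  cases m with
  | nil => exact absurd rfl h
  | cons p ps => simp [pvConsHead]

lemma neg_one_le_pvRfind (cs : List Char) : -1 ≤ pvRfind cs := by
  induction cs with
  | nil => simp [pvRfind]
  | cons c cs ih => simp only [pvRfind]; split_ifs <;> omega

lemma pvRfind_neg_iff (cs : List Char) : pvRfind cs < 0 ↔ '/' ∉ cs := by
  induction cs with
  | nil => simp [pvRfind]
  | cons c cs ih =>
    have hle := neg_one_le_pvRfind cs
    simp only [pvRfind, List.mem_cons]
    split_ifs with h1 h2
    · subst h2; simp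
    · have : '/' ∉ cs := ih.mp (by omega)
      simp [Ne.symm h2, this]
    · have : '/' ∈ cs := by by_contra hm; exact h1 (by have := ih.mpr hm; omega)
      simp [this]; omega

lemma pvSplit_length_one_iff (cs : List Char) : (pvSplit cs).length = 1 ↔ '/' ∉ cs := by
  induction cs with
  | nil => simp [pvSplit]
  | cons c cs ih =>
    simp only [pvSplit, List.mem_cons]
    split_ifs with h1
    · subst h1
      have := pvSplit_ne_nil cs
      simp
      omega
    · rw [length_pvConsHead _ (pvSplit_ne_nil cs)]
      simp [Ne.symm h1, ih]

-- rfind.go characterisation (single-character needle).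
lemma pvGo_zero (s sub : List Char) :
    PySem.Chars.rfind.go s sub 0 = if sub.isPrefixOf s then 0 else -1 := rfl

lemma pvGo_succ (s sub : List Char) (j : Nat) :
    PySem.Chars.rfind.go s sub (j+1) =
      if sub.isPrefixOf (s.drop (j+1)) then ((j:Int)+1) else PySem.Chars.rfind.go s sub j := rfl

lemma pvGo_cons (c : Char) (cs sub : List Char) (j : Nat) :
    PySem.Chars.rfind.go (c :: cs) sub (j+1) =
      if PySem.Chars.rfind.go cs sub j = -1 then PySem.Chars.rfind.go (c :: cs) sub 0
      else PySem.Chars.rfind.go cs sub j + 1 := by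
  induction j with
  | zero =>
    rw [pvGo_succ, pvGo_zero cs sub]
    simp only [List.drop_succ_cons, List.drop_zero]
    by_cases h : sub.isPrefixOf cs <;> simp [h]
  | succ j ih =>
    rw [pvGo_succ]
    have hd : (c :: cs).drop (j + 1 + 1) = cs.drop (j + 1) := by simp
    rw [hd, pvGo_succ cs sub j]
    by_cases h1 : sub.isPrefixOf (cs.drop (j+1))
    · rw [if_pos h1, if_pos h1, if_neg (by omega)]
      push_cast; ring
    · rw [if_neg h1, if_neg h1]
      exact ih

lemma rfind_eq_pvRfind (cs : List Char) : PySem.Chars.rfind cs ['/'] = pvRfind cs := by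
  induction cs with
  | nil => decide
  | cons c cs ih =>
    show PySem.Chars.rfind.go (c :: cs) ['/'] (cs.length + 1) = _
    rw [pvGo_cons]
    have hgo : PySem.Chars.rfind.go cs ['/'] cs.length = pvRfind cs := ih
    rw [hgo, pvGo_zero]
    simp only [pvRfind, List.isPrefixOf]
    by_cases hc : c = '/'
    · subst hc; simp
    · simp [hc, Ne.symm hc, beq_iff_eq]

-- splitOn.go adequacy (single-character separator).
lemma pvSplitGo (fuel : Nat) :
    ∀ (l cur : List Char) (acc : List (List Char)), l.length < fuel →
      PySem.Chars.splitOn.go ['/'] fuel l cur acc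
        = acc.reverse ++ pvConsHead cur.reverse (pvSplit l) := by
  induction fuel with
  | zero => intro l cur acc h; omega
  | succ f ih =>
    intro l cur acc h
    cases l with
    | nil =>
      show (cur.reverse :: acc).reverse = _
      simp [pvSplit, pvConsHead]
    | cons c rest =>
      show (if (['/'] : List Char).isPrefixOf (c :: rest)
              then PySem.Chars.splitOn.go ['/'] f ((c :: rest).drop 1) [] (cur.reverse :: acc)
              else PySem.Chars.splitOn.go ['/'] f rest (c :: cur) acc) = _
      have hlen : rest.length < f := by simp at h; omega
      by_cases hc : c = '/'
      · subst hc
        rw [if_pos (by simp [List.isPrefixOf])]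
        rw [ih _ _ _ (by simpa using hlen)]
        simp only [List.drop_succ_cons, List.drop_zero, List.reverse_nil]
        rw [pvConsHead_nil_of_ne_nil (pvSplit_ne_nil rest)]
        simp [pvSplit, pvConsHead]
      · rw [if_neg (by simp [List.isPrefixOf, beq_iff_eq]; exact fun h => absurd h.symm hc)]
        rw [ih _ _ _ hlen]
        simp only [pvSplit, if_neg hc, List.reverse_cons]
        rw [pvConsHead_pvConsHead]
  
lemma splitOn_eq_pvSplit (cs : List Char) : PySem.Chars.splitOn cs ['/'] = pvSplit cs := by
  show PySem.Chars.splitOn.go ['/'] (cs.length + 1) cs [] [] = _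
  rw [pvSplitGo (cs.length + 1) cs [] [] (by omega)]
  simp [pvConsHead_nil_of_ne_nil (pvSplit_ne_nil cs)]

-- The heart: A's reconstruction of all-but-last segments equals B's take-through-last-slash.
lemma pvMain (cs : List Char) :
    (pvSplit cs).dropLast.flatMap (· ++ ['/'])
      = (if pvRfind cs < 0 then [] else cs.take (pvRfind cs + 1).toNat) := by
  induction cs with
  | nil => simp [pvSplit, pvRfind]
  | cons c cs ih =>
    have hle := neg_one_le_pvRfind cs
    by_cases hr : pvRfind cs < 0
    · have hnot : '/' ∉ cs := (pvRfind_neg_iff cs).mp hr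
      have hone : (pvSplit cs).length = 1 := (pvSplit_length_one_iff cs).mpr hnot
      obtain ⟨p, hp⟩ : ∃ p, pvSplit cs = [p] := by
        cases hsp : pvSplit cs with
        | nil => exact absurd hsp (pvSplit_ne_nil cs)
        | cons q qs => rw [hsp] at hone; simp at hone; exact ⟨q, by rw [hone]⟩
      have hneg : pvRfind cs = -1 := by omega
      by_cases hc : c = '/'
      · subst hc
        rw [pvSplit_cons_slash, hp]
        simp [pvRfind, hneg]
      · rw [pvSplit_cons_ne cs hc, hp]
        simp [pvConsHead, pvRfind, hneg, hc]
    · have hge : 0 ≤ pvRfind cs := by omega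
      have hmem : '/' ∈ cs := by
        by_contra hm; exact hr ((pvRfind_neg_iff cs).mpr hm)
      obtain ⟨p, q, qs, hp⟩ : ∃ p q qs, pvSplit cs = p :: q :: qs := by
        cases hsp : pvSplit cs with
        | nil => exact absurd hsp (pvSplit_ne_nil cs)
        | cons p ps =>
          cases ps with
          | nil =>
            have := (pvSplit_length_one_iff cs).mp (by rw [hsp]; rfl)
            exact absurd hmem this
          | cons q qs => exact ⟨p, q, qs, rfl⟩
      have hneg : ¬ pvRfind cs = -1 := by omega
      have hrc : pvRfind (c :: cs) = pvRfind cs + 1 := by simp [pvRfind, hneg]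
      have htoNat : (pvRfind cs + 1 + 1).toNat = (pvRfind cs + 1).toNat + 1 := by omega
      rw [hrc, if_neg (by omega), htoNat, List.take_succ_cons]
      rw [hp] at ih
      rw [if_neg hr] at ih
      simp only [List.dropLast_cons₂, List.flatMap_cons] at ih
      by_cases hc : c = '/'
      · subst hc
        rw [pvSplit_cons_slash, hp]
        simp only [List.dropLast_cons₂, List.flatMap_cons]
        simp [← ih]
      · rw [pvSplit_cons_ne cs hc, hp]
        simp only [pvConsHead, List.dropLast_cons₂, List.flatMap_cons]
        simp [← ih]

-- A's loop, reduced to a flatMap over all-but-last segments.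
lemma loopA (xs : List (List Char)) (hne : xs ≠ []) :
    (PySem.List.pyRange 0 ((xs.length : Int) - 1)).foldl
      (fun cur a =>
        if PySem.List.pyGetD xs a [] = [] then cur ++ ['/']
        else cur ++ PySem.List.pyGetD xs a [] ++ ['/']) []
      = xs.dropLast.flatMap (· ++ ['/']) := by
  have hpos : 1 ≤ xs.length := List.length_pos_iff.mpr hne
  have hlen : ((xs.length : Int) - 1) = (xs.dropLast.length : Int) := by
    rw [List.length_dropLast]; omega
  rw [hlen]
  have hagree : ∀ (acc : List Char), ∀ a ∈ PySem.List.pyRange 0 ((xs.dropLast.length : Int)),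
      (if PySem.List.pyGetD xs a [] = [] then acc ++ ['/']
       else acc ++ PySem.List.pyGetD xs a [] ++ ['/'])
        = acc ++ (PySem.List.pyGetD xs.dropLast a [] ++ ['/']) := by
    intro acc a ha
    rw [PySem.List.mem_pyRange_one] at ha
    obtain ⟨h0, h1⟩ := ha
    have hdl : xs.dropLast.length = xs.length - 1 := List.length_dropLast
    have hlt2 : a < (xs.length : Int) := by omega
    rw [PySem.List.pyGetD_eq_getElem xs [] h0 hlt2,
        PySem.List.pyGetD_eq_getElem xs.dropLast [] h0 h1,
        List.getElem_dropLast]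
    split_ifs with h
    · simp [h]
    · simp
  rw [PySem.List.foldl_congr_mem _ _ _ [] hagree]
  rw [PySem.List.foldl_pyRange_zero_pyGetD' xs.dropLast [] (fun cur seg => cur ++ (seg ++ ['/'])) []]
  exact PySem.List.foldl_append_eq_flatMap (· ++ ['/']) xs.dropLast []

lemma portA_eq_flatMap (cs : List Char) :
    getFilenamePath (String.ofList cs)
      = String.ofList ((pvSplit cs).dropLast.flatMap (· ++ ['/'])) := by
  have hcs : (String.ofList cs).toList = cs := by simp
  simp only [getFilenamePath, hcs, splitOn_eq_pvSplit]
  rw [loopA (pvSplit cs) (pvSplit_ne_nil cs)]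

-- B, reduced to take-through-last-slash.
lemma portB_eq_take (cs : List Char) :
    getFilenamePath_alt (String.ofList cs)
      = String.ofList (if pvRfind cs < 0 then [] else cs.take (pvRfind cs + 1).toNat) := by
  have hcs : (String.ofList cs).toList = cs := by simp
  have hr : PySem.Str.rfind (String.ofList cs) "/" = pvRfind cs := by
    show PySem.Chars.rfind (String.ofList cs).toList ['/'] = _
    rw [hcs, rfind_eq_pvRfind]
  simp only [getFilenamePath_alt, hr]
  split_ifs with h
  · rfl
  · show String.ofList (PySem.Chars.slice (String.ofList cs).toList none (some (pvRfind cs + 1))) = _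
    rw [hcs, PySem.Chars.slice_eq_listSlice,
        PySem.List.slice_to _ (by omega : (0:Int) ≤ pvRfind cs + 1)]

-- ===== VERDICT (by name: the statement is the Claim_ definition above) =====
theorem getFilenamePath_spec : Claim_equal_getFilenamePath := by
  intro filename _
  show getFilenamePath filename = getFilenamePath_alt filename
  have h : filename = String.ofList filename.toList := by simp
  rw [h, portA_eq_flatMap, portB_eq_take, pvMain]
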